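-- pv_equiv track=rewrite | github.com/dermo64/advent2020 | day10/day10.py | num_configs
-- ===== SOURCE A (Python) =====
-- def num_configs(joltage, adapters, cache):
--     if joltage in cache:
--         return cache[joltage]
--     if len(adapters) == 1:
--         return 1
--     num = 0
--     if adapters[0] - joltage < 4:
--         num += num_configs(adapters[0], adapters[1:], cache)
--     if len(adapters) > 2 and adapters[1] - joltage < 4:
--         num += num_configs(adapters[1], adapters[2:], cache)
--     if len(adapters) > 3 and adapters[2] - joltage < 4:
--         num += num_configs(adapters[2], adapters[3:], cache)
--     cache[joltage] = num
--     return num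
-- ===== SOURCE B (Python) =====
-- def num_configs(joltage, adapters, cache):
--     if joltage in cache:
--         return cache[joltage]
--     n = len(adapters)
--     if n == 1:
--         return 1
--     # bottom-up over suffix start indices; dp holds the counts for states
--     # n-1, n-2, ..., i (appended in that order), so dp[-k] is the state i+k
--     dp = []
--     for i in range(n - 1, 0, -1):
--         if adapters[i - 1] in cache:
--             v = cache[adapters[i - 1]]
--         elif i == n - 1:
--             v = 1
--         else:
--             v = 0
--             for k in (1, 2, 3):
--                 if k <= len(dp) and adapters[i + k - 1] - adapters[i - 1] < 4:
--                     v += dp[-k]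
--         dp.append(v)
--     total = 0
--     for k in (1, 2, 3):
--         if k <= len(dp) and adapters[k - 1] - joltage < 4:
--             total += dp[-k]
--     return total
-- ===== Notes on version B (the rewrite author's own statement) =====
-- stated objective: alternative
-- what changed: Replaces A's memoized recursion over list slices (each call copies the suffix) by a single iterative bottom-up DP pass over suffix start indices — O(n) instead of O(n^2) on duplicate-free adapter lists, though a timing run could not verify this because its large inputs are duplicate-heavy and outside Pre_; …
-- outside the precondition, e.g. on num_configs(0, [1, 1, 2, 4], {}): A returns 5, B returns 4
import Mathlib
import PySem

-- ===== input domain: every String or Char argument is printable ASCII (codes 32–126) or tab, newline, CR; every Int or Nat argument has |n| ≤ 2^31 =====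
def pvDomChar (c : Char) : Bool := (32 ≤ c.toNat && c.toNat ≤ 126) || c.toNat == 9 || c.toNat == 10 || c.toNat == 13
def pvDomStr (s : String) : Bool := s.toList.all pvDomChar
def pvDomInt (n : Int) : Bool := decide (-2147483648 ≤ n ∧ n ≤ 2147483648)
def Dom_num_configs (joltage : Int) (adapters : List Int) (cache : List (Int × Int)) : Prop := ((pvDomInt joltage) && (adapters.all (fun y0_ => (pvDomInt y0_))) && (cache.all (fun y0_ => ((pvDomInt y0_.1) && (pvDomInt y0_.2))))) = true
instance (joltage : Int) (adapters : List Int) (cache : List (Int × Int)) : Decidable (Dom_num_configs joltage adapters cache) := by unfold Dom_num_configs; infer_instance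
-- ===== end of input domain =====

-- B replaces A's memoized recursion over list slices by one iterative bottom-up DP pass over
-- suffix start indices (objective: a different algorithm of lower cost on the duplicate-free
-- inputs Pre_ admits; a timing run could not verify a speed-up, so none is claimed).
-- A mutates its cache dict in place and the caller can observe that; the equivalence proved
-- here is about the RETURN value only (B never writes to the cache).

-- ===== PORT A =====
-- Python's dict argument is mutated across the recursive calls, so the helper threads the
-- cache: it returns (value, updated cache). On an empty adapters list with a cache miss the
-- Python raises IndexError; that branch returns a junk (0, cache) and is excluded by Pre_.
def numConfigsGo (j : Int) (adapters : List Int) (cache : PySem.Dict Int Int) :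
    Int × PySem.Dict Int Int :=
  match PySem.Dict.get? cache j with
  | some v => (v, cache)
  | none =>
    match adapters with
    | [] => (0, cache)
    | [_] => (1, cache)
    | a0 :: a1 :: t2 =>
      let p1 := if a0 - j < 4 then numConfigsGo a0 (a1 :: t2) cache else (0, cache)
      let p2 := if 0 < t2.length ∧ a1 - j < 4 then numConfigsGo a1 t2 p1.2 else (0, p1.2)
      let p3 := match t2 with
        | [] => (0, p2.2)
        | a2 :: t3 => if 0 < t3.length ∧ a2 - j < 4 then numConfigsGo a2 t3 p2.2 else (0, p2.2)
      let num := p1.1 + p2.1 + p3.1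
      (num, p3.2.insert j num)
termination_by adapters.length
decreasing_by all_goals (simp_all; try omega)

def num_configs (joltage : Int) (adapters : List Int) (cache : List (Int × Int)) : Int :=
  (numConfigsGo joltage adapters (PySem.Dict.mk cache)).1

-- ===== PORT B =====
-- stepFn is the body of Source B's for-loop: it appends the count for the state whose suffix
-- starts at index i to dp (so dp[-k] is the state i+k).
def stepFn (d : PySem.Dict Int Int) (A : List Int) (dp : List Int) (i : Int) : List Int :=
  let v :=
    match PySem.Dict.get? d (PySem.List.pyGetD A (i - 1) 0) with
    | some w => w
    | none =>
      if i == (A.length : Int) - 1 then 1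
      else
        [(1 : Int), 2, 3].foldl (fun v k =>
          if k ≤ (dp.length : Int) ∧
              PySem.List.pyGetD A (i + k - 1) 0 - PySem.List.pyGetD A (i - 1) 0 < 4
          then v + PySem.List.pyGetD dp (-k) 0 else v) 0
  dp ++ [v]

def num_configs_alt (joltage : Int) (adapters : List Int) (cache : List (Int × Int)) : Int :=
  match PySem.Dict.get? (PySem.Dict.mk cache) joltage with
  | some v => v
  | none =>
    let n : Int := adapters.length
    if n == 1 then 1
    else
      let dp := (PySem.List.pyRange (n - 1) 0 (-1)).foldl
        (stepFn (PySem.Dict.mk cache) adapters) []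
      [(1 : Int), 2, 3].foldl (fun t k =>
        if k ≤ (dp.length : Int) ∧ PySem.List.pyGetD adapters (k - 1) 0 - joltage < 4
        then t + PySem.List.pyGetD dp (-k) 0 else t) 0

-- ===== PRECONDITION & SPEC =====
-- Pre_ excludes (a) adapter lists with duplicate values, on which A STILL RETURNS a value but
-- its cache — keyed by the joltage value alone — accidentally conflates distinct suffix
-- states (see the cite in the claim), (b) an empty adapters list with a cache miss, on which
-- the Python A raises IndexError, and (c) duplicate keys in the cache association list,
-- which a Python dict cannot represent.
def Pre_num_configs (joltage : Int) (adapters : List Int) (cache : List (Int × Int)) : Prop :=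
  (adapters ≠ [] ∨ joltage ∈ cache.map Prod.fst) ∧ adapters.Nodup ∧ (cache.map Prod.fst).Nodup
instance (joltage : Int) (adapters : List Int) (cache : List (Int × Int)) : Decidable (Pre_num_configs joltage adapters cache) := by unfold Pre_num_configs; infer_instance

def pvWitness_num_configs : Int × List Int × (List (Int × Int)) := (5, [6, 7, 9, 11], [(2, 9)])

def Spec_num_configs (joltage : Int) (adapters : List Int) (cache : List (Int × Int)) (out : Int) : Prop := out = num_configs_alt joltage adapters cache
instance (joltage : Int) (adapters : List Int) (cache : List (Int × Int)) (out : Int) : Decidable (Spec_num_configs joltage adapters cache out) := by unfold Spec_num_configs; infer_instance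

-- ===== CLAIM (what is proved, stated in full; the proofs are below) =====
def Claim_equal_num_configs : Prop := ∀ (joltage : Int) (adapters : List Int) (cache : List (Int × Int)), Dom_num_configs joltage adapters cache → Pre_num_configs joltage adapters cache → Spec_num_configs joltage adapters cache (num_configs joltage adapters cache)

-- ===== LEMMAS AND PROOFS =====

-- the common mathematical value of the state (joltage j, suffix starting at index i), read
-- off the initial cache c0; both ports are proved to compute pureV … j 0
def pureV (c0 : PySem.Dict Int Int) (A : List Int) (j : Int) (i : Nat) : Int :=
  match PySem.Dict.get? c0 j with
  | some v => v
  | none =>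
    if i + 1 = A.length then 1
    else
      (if h1 : i + 1 < A.length ∧ A.getD i 0 - j < 4 then pureV c0 A (A.getD i 0) (i + 1) else 0)
      + (if h2 : i + 2 < A.length ∧ A.getD (i + 1) 0 - j < 4 then pureV c0 A (A.getD (i + 1) 0) (i + 2) else 0)
      + (if h3 : i + 3 < A.length ∧ A.getD (i + 2) 0 - j < 4 then pureV c0 A (A.getD (i + 2) 0) (i + 3) else 0)
termination_by A.length - i
decreasing_by all_goals omega

-- pureV of the state whose suffix starts at index i (its joltage is A[i-1])
def gVal (d : PySem.Dict Int Int) (A : List Int) (i : Nat) : Int :=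
  pureV d A (A.getD (i - 1) 0) i

-- the dp list Source B has built after processing states n-1, n-2, …, i
def dpFor (d : PySem.Dict Int Int) (A : List Int) (i : Nat) : List Int :=
  (List.range (A.length - i)).map (fun t => gVal d A (A.length - 1 - t))

lemma length_dpFor (d : PySem.Dict Int Int) (A : List Int) (i : Nat) :
    (dpFor d A i).length = A.length - i := by simp [dpFor]

lemma dpFor_succ_append (d : PySem.Dict Int Int) (A : List Int) (i : Nat)
    (h1 : 1 ≤ i) (h2 : i < A.length) :
    dpFor d A i = dpFor d A (i + 1) ++ [gVal d A i] := by
  unfold dpFor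
  have h3 : A.length - i = (A.length - (i + 1)) + 1 := by omega
  rw [h3, List.range_succ, List.map_append]
  simp only [List.map_cons, List.map_nil]
  have h4 : A.length - 1 - (A.length - (i + 1)) = i := by omega
  rw [h4]

lemma dp_neg_get (d : PySem.Dict Int Int) (A : List Int) (i k : Nat)
    (hk : 1 ≤ k) (hik : i + k < A.length) :
    PySem.List.pyGetD (dpFor d A (i + 1)) (-(k : Int)) 0 = gVal d A (i + k) := by
  have hlen : (dpFor d A (i + 1)).length = A.length - (i + 1) := length_dpFor d A (i + 1)
  rw [PySem.List.pyGetD_neg_natCast _ _ _ hk (by omega)]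
  simp only [dpFor, List.length_map, List.length_range, List.getElem_map, List.getElem_range]
  congr 1
  omega

lemma step_dp (d : PySem.Dict Int Int) (A : List Int) (i : Nat)
    (h1 : 1 ≤ i) (h2 : i < A.length) :
    stepFn d A (dpFor d A (i + 1)) (i : Int) = dpFor d A i := by
  rw [dpFor_succ_append d A i h1 h2]
  unfold stepFn
  refine congrArg (fun x => dpFor d A (i + 1) ++ [x]) ?_
  have hidx : (i : Int) - 1 = ((i - 1 : Nat) : Int) := by omega
  rw [hidx, PySem.List.pyGetD_natCast]
  rw [gVal, pureV]
  cases hget : PySem.Dict.get? d (A.getD (i - 1) 0) with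
  | some w => simp
  | none =>
    simp only []
    by_cases hbase : i + 1 = A.length
    · have hb : ((i : Int) == (A.length : Int) - 1) = true := by simp; omega
      simp [hb, hbase]
    · have hne : ((i : Int) == (A.length : Int) - 1) = false := by simp; omega
      simp only [hne, Bool.false_eq_true, if_false, hbase]
      simp only [List.foldl_cons, List.foldl_nil, length_dpFor]
      have e1 : (i : Int) + 1 - 1 = ((i : Nat) : Int) := by omega
      have e2 : (i : Int) + 2 - 1 = ((i + 1 : Nat) : Int) := by push_cast; omega
      have e3 : (i : Int) + 3 - 1 = ((i + 2 : Nat) : Int) := by push_cast; omega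
      rw [e1, e2, e3, PySem.List.pyGetD_natCast, PySem.List.pyGetD_natCast,
        PySem.List.pyGetD_natCast]
      have g1c : ((1 : Int) ≤ ((A.length - (i + 1) : Nat) : Int) ∧
          A.getD i 0 - A.getD (i - 1) 0 < 4) ↔
          (i + 1 < A.length ∧ A.getD i 0 - A.getD (i - 1) 0 < 4) :=
        and_congr_left' (by omega)
      have g2c : ((2 : Int) ≤ ((A.length - (i + 1) : Nat) : Int) ∧
          A.getD (i + 1) 0 - A.getD (i - 1) 0 < 4) ↔
          (i + 2 < A.length ∧ A.getD (i + 1) 0 - A.getD (i - 1) 0 < 4) :=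
        and_congr_left' (by omega)
      have g3c : ((3 : Int) ≤ ((A.length - (i + 1) : Nat) : Int) ∧
          A.getD (i + 2) 0 - A.getD (i - 1) 0 < 4) ↔
          (i + 3 < A.length ∧ A.getD (i + 2) 0 - A.getD (i - 1) 0 < 4) :=
        and_congr_left' (by omega)
      have hd1 : i + 1 < A.length →
          PySem.List.pyGetD (dpFor d A (i + 1)) (-1) 0 = pureV d A (A.getD i 0) (i + 1) := by
        intro h
        have := dp_neg_get d A i 1 (by norm_num) (by omega)
        simpa [gVal] using this
      have hd2 : i + 2 < A.length →
          PySem.List.pyGetD (dpFor d A (i + 1)) (-2) 0 = pureV d A (A.getD (i + 1) 0) (i + 2) := by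
        intro h
        have := dp_neg_get d A i 2 (by norm_num) (by omega)
        simpa [gVal] using this
      have hd3 : i + 3 < A.length →
          PySem.List.pyGetD (dpFor d A (i + 1)) (-3) 0 = pureV d A (A.getD (i + 2) 0) (i + 3) := by
        intro h
        have := dp_neg_get d A i 3 (by norm_num) (by omega)
        simpa [gVal] using this
      by_cases c1 : i + 1 < A.length ∧ A.getD i 0 - A.getD (i - 1) 0 < 4 <;>
      by_cases c2 : i + 2 < A.length ∧ A.getD (i + 1) 0 - A.getD (i - 1) 0 < 4 <;>
      by_cases c3 : i + 3 < A.length ∧ A.getD (i + 2) 0 - A.getD (i - 1) 0 < 4 <;>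
      · (first | rw [if_pos (g3c.mpr c3)] | rw [if_neg (fun h => c3 (g3c.mp h))])
        (first | rw [if_pos (g2c.mpr c2)] | rw [if_neg (fun h => c2 (g2c.mp h))])
        (first | rw [if_pos (g1c.mpr c1)] | rw [if_neg (fun h => c1 (g1c.mp h))])
        (first | rw [dif_pos c1] | rw [dif_neg c1])
        (first | rw [dif_pos c2] | rw [dif_neg c2])
        (first | rw [dif_pos c3] | rw [dif_neg c3])
        (try rw [hd1 c1.1]); (try rw [hd2 c2.1]); (try rw [hd3 c3.1])
        try ring

lemma foldB (d : PySem.Dict Int Int) (A : List Int) :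
    ∀ i : Nat, 1 ≤ i → i ≤ A.length →
      (PySem.List.pyRange ((i : Int) - 1) 0 (-1)).foldl (stepFn d A) (dpFor d A i) =
        dpFor d A 1 := by
  intro i hi
  induction i, hi using Nat.le_induction with
  | base =>
    intro _
    rw [show ((1 : Nat) : Int) - 1 = 0 by norm_num, PySem.List.pyRange_neg_one_eq_nil le_rfl,
      List.foldl_nil]
  | succ m hm ih =>
    intro hle
    have hcast : ((m + 1 : Nat) : Int) - 1 = (m : Int) := by push_cast; omega
    rw [hcast, PySem.List.pyRange_neg_one_cons (by exact_mod_cast hm), List.foldl_cons]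
    rw [step_dp d A m hm (by omega)]
    have hc2 : (m : Int) - 1 = ((m : Nat) : Int) - 1 := rfl
    rw [hc2]
    exact ih (by omega)

lemma final_sum (d : PySem.Dict Int Int) (A : List Int) (j : Int)
    (h0 : PySem.Dict.get? d j = none) (hn : A.length ≠ 1) :
    [(1 : Int), 2, 3].foldl (fun t k =>
        if k ≤ ((dpFor d A 1).length : Int) ∧ PySem.List.pyGetD A (k - 1) 0 - j < 4
        then t + PySem.List.pyGetD (dpFor d A 1) (-k) 0 else t) 0 =
      pureV d A j 0 := by
  rw [pureV]
  simp only [h0]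
  rw [if_neg (by omega : ¬ (0 + 1 = A.length))]
  simp only [List.foldl_cons, List.foldl_nil, length_dpFor, Nat.zero_add]
  have e1 : (1 : Int) - 1 = ((0 : Nat) : Int) := by norm_num
  have e2 : (2 : Int) - 1 = ((1 : Nat) : Int) := by norm_num
  have e3 : (3 : Int) - 1 = ((2 : Nat) : Int) := by norm_num
  rw [e1, e2, e3, PySem.List.pyGetD_natCast, PySem.List.pyGetD_natCast,
    PySem.List.pyGetD_natCast]
  have g1c : ((1 : Int) ≤ ((A.length - 1 : Nat) : Int) ∧ A.getD 0 0 - j < 4) ↔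
      (1 < A.length ∧ A.getD 0 0 - j < 4) := and_congr_left' (by omega)
  have g2c : ((2 : Int) ≤ ((A.length - 1 : Nat) : Int) ∧ A.getD 1 0 - j < 4) ↔
      (2 < A.length ∧ A.getD 1 0 - j < 4) := and_congr_left' (by omega)
  have g3c : ((3 : Int) ≤ ((A.length - 1 : Nat) : Int) ∧ A.getD 2 0 - j < 4) ↔
      (3 < A.length ∧ A.getD 2 0 - j < 4) := and_congr_left' (by omega)
  have hd1 : 1 < A.length →
      PySem.List.pyGetD (dpFor d A 1) (-1) 0 = pureV d A (A.getD 0 0) 1 := by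
    intro h
    have := dp_neg_get d A 0 1 (by norm_num) (by omega)
    simpa [gVal] using this
  have hd2 : 2 < A.length →
      PySem.List.pyGetD (dpFor d A 1) (-2) 0 = pureV d A (A.getD 1 0) 2 := by
    intro h
    have := dp_neg_get d A 0 2 (by norm_num) (by omega)
    simpa [gVal] using this
  have hd3 : 3 < A.length →
      PySem.List.pyGetD (dpFor d A 1) (-3) 0 = pureV d A (A.getD 2 0) 3 := by
    intro h
    have := dp_neg_get d A 0 3 (by norm_num) (by omega)
    simpa [gVal] using this
  by_cases c1 : 1 < A.length ∧ A.getD 0 0 - j < 4 <;>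
  by_cases c2 : 2 < A.length ∧ A.getD 1 0 - j < 4 <;>
  by_cases c3 : 3 < A.length ∧ A.getD 2 0 - j < 4 <;>
  · (first | rw [if_pos (g3c.mpr c3)] | rw [if_neg (fun h => c3 (g3c.mp h))])
    (first | rw [if_pos (g2c.mpr c2)] | rw [if_neg (fun h => c2 (g2c.mp h))])
    (first | rw [if_pos (g1c.mpr c1)] | rw [if_neg (fun h => c1 (g1c.mp h))])
    (first | rw [dif_pos c1] | rw [dif_neg c1])
    (first | rw [dif_pos c2] | rw [dif_neg c2])
    (first | rw [dif_pos c3] | rw [dif_neg c3])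
    (try rw [hd1 c1.1]); (try rw [hd2 c2.1]); (try rw [hd3 c3.1])
    try ring

lemma B_eq_pure (joltage : Int) (A : List Int) (cache : List (Int × Int)) :
    num_configs_alt joltage A cache = pureV (PySem.Dict.mk cache) A joltage 0 := by
  unfold num_configs_alt
  cases hget : PySem.Dict.get? (PySem.Dict.mk cache) joltage with
  | some v => rw [pureV]; simp only [hget]
  | none =>
    simp only []
    by_cases h1 : A.length = 1
    · rw [if_pos (by simp [h1]), pureV]
      simp only [hget]
      rw [if_pos (by omega)]
    · rw [if_neg (by simp; omega)]
      have hdp : (PySem.List.pyRange ((A.length : Int) - 1) 0 (-1)).foldl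
          (stepFn (PySem.Dict.mk cache) A) [] = dpFor (PySem.Dict.mk cache) A 1 := by
        by_cases h0 : A.length = 0
        · rw [h0]
          norm_num [dpFor, h0]
        · have hstart : ([] : List Int) = dpFor (PySem.Dict.mk cache) A A.length := by
            simp [dpFor]
          rw [hstart]
          exact foldB (PySem.Dict.mk cache) A A.length (by omega) le_rfl
      rw [hdp]
      exact final_sum (PySem.Dict.mk cache) A joltage hget h1

-- every binding of A's threaded cache is either an initial binding or the correct pure value
-- of the unique state keyed by it
def CacheInv (c0 : PySem.Dict Int Int) (A : List Int) (c : PySem.Dict Int Int) : Prop :=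
  ∀ k : Int,
    (∀ v, c.get? k = some v →
      c0.get? k = some v ∨
      ∃ i : Nat, 1 ≤ i ∧ i < A.length ∧ k = A.getD (i - 1) 0 ∧ c0.get? k = none ∧
        v = pureV c0 A k i)
    ∧ (c.get? k = none → c0.get? k = none)

lemma go_pure_fuel (c0 : PySem.Dict Int Int) (A : List Int) (hA : A.Nodup) :
    ∀ fuel : Nat, ∀ i : Nat, ∀ j : Int, ∀ c : PySem.Dict Int Int,
      A.length - i ≤ fuel → i ≤ A.length →
      (1 ≤ i → j = A.getD (i - 1) 0) →
      (i = 0 → ∀ v, c.get? j = some v → c0.get? j = some v) →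
      CacheInv c0 A c →
      (numConfigsGo j (A.drop i) c).1 = pureV c0 A j i ∧
      (1 ≤ i → CacheInv c0 A (numConfigsGo j (A.drop i) c).2) := by
  intro fuel
  induction fuel with
  | zero =>
    intro i j c hf h2 hj hi0 hc
    have hieq : i = A.length := by omega
    rw [List.drop_eq_nil_of_le (by omega)]
    rw [numConfigsGo.eq_def]
    cases hg : PySem.Dict.get? c j with
    | some v =>
      simp only []
      refine ⟨?_, fun _ => hc⟩
      rcases Nat.eq_zero_or_pos i with hz | hpos
      · rw [pureV]; simp only [hi0 hz v hg]
      · rcases ((hc j).1 v hg) with hinit | ⟨m, hm1, hm2, hkey, hc0, hval⟩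
        · rw [pureV]; simp only [hinit]
        · exfalso
          have hi' : i - 1 < A.length := by omega
          have hm' : m - 1 < A.length := by omega
          have e1 : A.getD (i - 1) 0 = A[i - 1] := List.getD_eq_getElem A 0 hi'
          have e2 : A.getD (m - 1) 0 = A[m - 1] := List.getD_eq_getElem A 0 hm'
          have heq : A[i - 1]'hi' = A[m - 1]'hm' := by rw [← e1, ← e2, ← hkey, hj hpos]
          have := (List.Nodup.getElem_inj_iff hA).mp heq
          omega
    | none =>
      simp only []
      have hc0none : c0.get? j = none := (hc j).2 hg
      refine ⟨?_, fun _ => hc⟩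
      rw [pureV]
      simp only [hc0none]
      rw [if_neg (by omega : ¬ (i + 1 = A.length))]
      rw [dif_neg (fun hcc : i + 1 < A.length ∧ _ => by omega),
        dif_neg (fun hcc : i + 2 < A.length ∧ _ => by omega),
        dif_neg (fun hcc : i + 3 < A.length ∧ _ => by omega)]
      norm_num
  | succ f ih =>
    intro i j c hf h2 hj hi0 hc
    by_cases hend : A.length ≤ i
    · exact ih i j c (by omega) h2 hj hi0 hc
    rw [numConfigsGo.eq_def]
    cases hg : PySem.Dict.get? c j with
    | some v =>
      simp only []
      refine ⟨?_, fun _ => hc⟩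
      rcases Nat.eq_zero_or_pos i with hz | hpos
      · rw [pureV]; simp only [hi0 hz v hg]
      · rcases ((hc j).1 v hg) with hinit | ⟨m, hm1, hm2, hkey, hc0, hval⟩
        · rw [pureV]; simp only [hinit]
        · -- Nodup: the index m is i
          have hjkey : j = A.getD (m - 1) 0 := hkey
          have hieq : i = m := by
            have hi' : i - 1 < A.length := by omega
            have hm' : m - 1 < A.length := by omega
            have e1 : A.getD (i - 1) 0 = A[i - 1] := List.getD_eq_getElem A 0 hi'
            have e2 : A.getD (m - 1) 0 = A[m - 1] := List.getD_eq_getElem A 0 hm'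
            have : A[i - 1]'hi' = A[m - 1]'hm' := by rw [← e1, ← e2, ← hjkey, hj hpos]
            have := (List.Nodup.getElem_inj_iff hA).mp this
            omega
          rw [hval, hieq]
    | none =>
      have hc0none : c0.get? j = none := (hc j).2 hg
      simp only []
      cases hd : A.drop i with
      | nil =>
        exfalso
        have := congrArg List.length hd
        simp at this
        omega
      | cons a0 t =>
        have hlen : A.length - i = t.length + 1 := by
          have := congrArg List.length hd
          simpa using this
        have ha0 : A.getD i 0 = a0 := by
          have : A[i]? = some a0 := by
            have := congrArg (fun l => l[0]?) hd
            simpa [List.getElem?_drop] using this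
          simp [List.getD, this]
        cases t with
        | nil =>
          simp only [List.length_nil] at hlen
          refine ⟨?_, fun _ => hc⟩
          rw [pureV]
          simp only [hc0none]
          rw [if_pos (by omega)]
        | cons a1 t2 =>
          simp only [List.length_cons] at hlen
          have hdrop1 : A.drop (i + 1) = a1 :: t2 := by
            have h' : A.drop (i + 1) = (A.drop i).tail := by
              rw [← List.drop_drop]; simp
            rw [h', hd]; rfl
          have hdrop2 : A.drop (i + 2) = t2 := by
            have h' : A.drop (i + 2) = (A.drop (i + 1)).tail := by
              rw [← List.drop_drop]; simp
            rw [h', hdrop1]; rfl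
          have ha1 : A.getD (i + 1) 0 = a1 := by
            have : A[i + 1]? = some a1 := by
              have := congrArg (fun l => l[0]?) hdrop1
              simpa [List.getElem?_drop] using this
            simp [List.getD, this]
          have ht2len : t2.length = A.length - (i + 2) := by omega
          have hilen : i + 2 ≤ A.length := by omega
          simp only []
          have hp1 : (if a0 - j < 4 then
                numConfigsGo a0 (a1 :: t2) c else (0, c)).1 =
              (if i + 1 < A.length ∧ a0 - j < 4 then
                pureV c0 A a0 (i + 1) else 0) ∧
              CacheInv c0 A (if a0 - j < 4 then
                numConfigsGo a0 (a1 :: t2) c else (0, c)).2 := by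
            by_cases g : a0 - j < 4
            · rw [if_pos g, if_pos (show i + 1 < A.length ∧ a0 - j < 4 from ⟨by omega, g⟩)]
              have hih := ih (i + 1) a0 c (by omega) (by omega)
                (fun _ => by rw [show (i + 1) - 1 = i from rfl, ha0]) (by omega) hc
              rw [hdrop1] at hih
              exact ⟨hih.1, hih.2 (by omega)⟩
            · rw [if_neg g, if_neg (show ¬ (i + 1 < A.length ∧ a0 - j < 4) from
                fun hcc => g hcc.2)]
              exact ⟨rfl, hc⟩
          obtain ⟨hp1v, hp1c⟩ := hp1
          have hp2 : (if 0 < t2.length ∧ a1 - j < 4 then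
                numConfigsGo a1 t2 (if a0 - j < 4 then
                  numConfigsGo a0 (a1 :: t2) c else (0, c)).2
              else (0, (if a0 - j < 4 then
                  numConfigsGo a0 (a1 :: t2) c else (0, c)).2)).1 =
              (if i + 2 < A.length ∧ a1 - j < 4 then
                pureV c0 A a1 (i + 2) else 0) ∧
              CacheInv c0 A (if 0 < t2.length ∧ a1 - j < 4 then
                numConfigsGo a1 t2 (if a0 - j < 4 then
                  numConfigsGo a0 (a1 :: t2) c else (0, c)).2
              else (0, (if a0 - j < 4 then
                  numConfigsGo a0 (a1 :: t2) c else (0, c)).2)).2 := by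
            by_cases g : 0 < t2.length ∧ a1 - j < 4
            · rw [if_pos g, if_pos (show i + 2 < A.length ∧ a1 - j < 4 from
                ⟨by omega, g.2⟩)]
              have hih := ih (i + 2) a1 _ (by omega) (by omega)
                (fun _ => by rw [show (i + 2) - 1 = i + 1 from rfl, ha1]) (by omega) hp1c
              rw [hdrop2] at hih
              exact ⟨hih.1, hih.2 (by omega)⟩
            · rw [if_neg g, if_neg (show ¬ (i + 2 < A.length ∧ a1 - j < 4) from
                fun hcc => g ⟨by omega, hcc.2⟩)]
              exact ⟨rfl, hp1c⟩
          obtain ⟨hp2v, hp2c⟩ := hp2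
          revert hp2v hp2c
          generalize hq2 : (if 0 < t2.length ∧ a1 - j < 4 then
                numConfigsGo a1 t2 (if a0 - j < 4 then
                  numConfigsGo a0 (a1 :: t2) c else (0, c)).2
              else (0, (if a0 - j < 4 then
                  numConfigsGo a0 (a1 :: t2) c else (0, c)).2)) = q2
          intro hp2v hp2c
          have hp3 : (match t2 with
                | [] => (0, q2.2)
                | a2 :: t3 => if 0 < t3.length ∧ a2 - j < 4 then
                    numConfigsGo a2 t3 q2.2 else (0, q2.2)).1 =
              (if i + 3 < A.length ∧ A.getD (i + 2) 0 - j < 4 then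
                pureV c0 A (A.getD (i + 2) 0) (i + 3) else 0) ∧
              CacheInv c0 A (match t2 with
                | [] => (0, q2.2)
                | a2 :: t3 => if 0 < t3.length ∧ a2 - j < 4 then
                    numConfigsGo a2 t3 q2.2 else (0, q2.2)).2 := by
            cases ht2 : t2 with
            | nil =>
              refine ⟨?_, hp2c⟩
              rw [if_neg (show ¬ (i + 3 < A.length ∧ A.getD (i + 2) 0 - j < 4) from
                by rw [ht2] at ht2len; simp at ht2len; omega)]
            | cons a2 t3 =>
              have hred : (match a2 :: t3 with
                  | [] => (0, q2.2)
                  | a2 :: t3 => if 0 < t3.length ∧ a2 - j < 4 then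
                      numConfigsGo a2 t3 q2.2 else (0, q2.2))
                  = (if 0 < t3.length ∧ a2 - j < 4 then
                      numConfigsGo a2 t3 q2.2 else (0, q2.2)) := rfl
              rw [hred]
              have ha2 : A.getD (i + 2) 0 = a2 := by
                have : A[i + 2]? = some a2 := by
                  have hdd : A.drop (i + 2) = a2 :: t3 := by rw [hdrop2, ht2]
                  have := congrArg (fun l => l[0]?) hdd
                  simpa [List.getElem?_drop] using this
                simp [List.getD, this]
              have ht3len : t3.length = A.length - (i + 3) := by
                rw [ht2] at ht2len; simp at ht2len; omega
              have hdrop3 : A.drop (i + 3) = t3 := by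
                have h' : A.drop (i + 3) = (A.drop (i + 2)).tail := by
                  rw [← List.drop_drop]; simp
                rw [h', hdrop2, ht2]; rfl
              by_cases g : 0 < t3.length ∧ a2 - j < 4
              · rw [if_pos g, if_pos (show i + 3 < A.length ∧ A.getD (i + 2) 0 - j < 4 from
                  ⟨by omega, by rw [ha2]; exact g.2⟩), ha2]
                have hih := ih (i + 3) a2 _ (by omega) (by omega)
                  (fun _ => by rw [show (i + 3) - 1 = i + 2 from rfl, ha2]) (by omega) hp2c
                rw [hdrop3] at hih
                exact ⟨hih.1, hih.2 (by omega)⟩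
              · rw [if_neg g, if_neg (show ¬ (i + 3 < A.length ∧ A.getD (i + 2) 0 - j < 4) from
                  fun hcc => g ⟨by omega, by rw [← ha2]; exact hcc.2⟩)]
                exact ⟨rfl, hp2c⟩
          obtain ⟨hp3v, hp3c⟩ := hp3
          revert hp3v hp3c
          generalize hq3 : (match t2 with
                | [] => (0, q2.2)
                | a2 :: t3 => if 0 < t3.length ∧ a2 - j < 4 then
                    numConfigsGo a2 t3 q2.2 else (0, q2.2)) = q3
          intro hp3v hp3c
          constructor
          · -- value
            rw [hp1v, hp2v, hp3v]
            conv_rhs => rw [pureV]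
            simp only [hc0none]
            rw [if_neg (by omega : ¬ (i + 1 = A.length))]
            simp only [dite_eq_ite, ha0, ha1]
          · -- invariant after the insert
            intro hi1
            have hnum : (if a0 - j < 4 then
                  numConfigsGo a0 (a1 :: t2) c else (0, c)).1 + q2.1 + q3.1 =
                pureV c0 A j i := by
              rw [hp1v, hp2v, hp3v]
              conv_rhs => rw [pureV]
              simp only [hc0none]
              rw [if_neg (by omega : ¬ (i + 1 = A.length))]
              simp only [dite_eq_ite, ha0, ha1]
            intro k
            constructor
            · intro v hv
              rw [PySem.Dict.get?_insert] at hv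
              by_cases hk : k = j
              · rw [if_pos hk] at hv
                right
                refine ⟨i, hi1, by omega, by rw [hk]; exact hj hi1, by rw [hk]; exact hc0none, ?_⟩
                have hveq : v = (if a0 - j < 4 then
                    numConfigsGo a0 (a1 :: t2) c else (0, c)).1 + q2.1 + q3.1 := by
                  injection hv with h; exact h.symm
                rw [hveq, hnum, hk]
              · rw [if_neg hk] at hv
                exact (hp3c k).1 v hv
            · intro hv
              rw [PySem.Dict.get?_insert] at hv
              by_cases hk : k = j
              · rw [if_pos hk] at hv; exact absurd hv (by simp)
              · rw [if_neg hk] at hv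
                exact (hp3c k).2 hv

lemma A_eq_pure (joltage : Int) (A : List Int) (cache : List (Int × Int)) (hA : A.Nodup) :
    num_configs joltage A cache = pureV (PySem.Dict.mk cache) A joltage 0 := by
  unfold num_configs
  have hinv : CacheInv (PySem.Dict.mk cache) A (PySem.Dict.mk cache) := by
    intro k; exact ⟨fun v hv => Or.inl hv, fun h => h⟩
  have h := go_pure_fuel (PySem.Dict.mk cache) A hA A.length 0 joltage (PySem.Dict.mk cache)
    (by omega) (by omega) (fun h => absurd h (by omega)) (fun _ => fun v hv => hv) hinv
  rw [List.drop_zero] at h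
  exact h.1

-- ===== VERDICT (by name: the statement is the Claim_ definition above) =====
theorem num_configs_spec : Claim_equal_num_configs := by
  intro joltage adapters cache _ hpre
  unfold Spec_num_configs
  rw [A_eq_pure joltage adapters cache hpre.2.1, B_eq_pure]
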